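-- pv_equiv track=rewrite | github.com/vietvk92/kflow-cli | kflow/services/inspect_service.py | _parse_structured_output
-- ===== SOURCE A (Python) =====
-- def _parse_structured_output(lines: list[str]) -> dict[str, list[str]]:
--     """Parse simple `key: value` output into grouped fields."""
--     fields: dict[str, list[str]] = {}
--     for line in lines:
--         if ":" not in line:
--             continue
--         key, value = line.split(":", maxsplit=1)
--         normalized_key = key.strip().lower().replace(" ", "_")
--         normalized_value = value.strip()
--         if not normalized_key or not normalized_value:
--             continue
--         bucket = fields.setdefault(normalized_key, [])
--         if normalized_value not in bucket:
--             bucket.append(normalized_value)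
--     return fields
-- ===== SOURCE B (Python) =====
-- def _parse_structured_output(lines: list[str]) -> dict[str, list[str]]:
--     """Parse `key: value` lines by flattening to a (key, value) pair list,
--     then grouping: distinct keys in first-appearance order, each bucket the
--     order-preserving dedup of that key's values gathered by a scan of the pairs."""
--
--     def parse(line):
--         key, sep, value = line.partition(":")
--         if not sep:
--             return None
--         k = key.strip().lower().replace(" ", "_")
--         v = value.strip()
--         return (k, v) if k and v else None
--
--     pairs = [p for p in map(parse, lines) if p is not None]
--     keys = list(dict.fromkeys(k for k, _ in pairs))
--     return {k: list(dict.fromkeys(v for k2, v in pairs if k2 == k)) for k in keys}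
-- ===== Notes on version B (the rewrite author's own statement) =====
-- stated objective: alternative
-- what changed: B abandons A's single-pass dict accumulation: it first flattens the lines into a plain list of normalized (key, value) pairs via a partition-based parse helper, then builds the result by taking the deduplicated key list and, for each key, scanning the pair list to collect and dedup its values - no dict/bucket state is mutated during the line loop.
import Mathlib
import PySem

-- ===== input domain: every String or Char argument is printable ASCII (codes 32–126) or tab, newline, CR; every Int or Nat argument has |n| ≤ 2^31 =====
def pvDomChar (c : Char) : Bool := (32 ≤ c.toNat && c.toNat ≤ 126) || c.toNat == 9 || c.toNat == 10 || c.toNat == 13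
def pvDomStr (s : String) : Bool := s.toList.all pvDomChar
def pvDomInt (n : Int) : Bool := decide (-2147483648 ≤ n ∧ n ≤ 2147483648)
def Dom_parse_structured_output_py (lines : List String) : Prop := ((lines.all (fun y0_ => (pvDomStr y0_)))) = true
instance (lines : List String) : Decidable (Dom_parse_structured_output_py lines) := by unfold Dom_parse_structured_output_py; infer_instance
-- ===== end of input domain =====

-- B replaces A's single-pass dict accumulation by flatten-to-pairs, then group-by-key scans
-- (alternative decomposition; not claimed faster).

-- ===== PORT A =====
-- one iteration of A's loop: skip lines without ':', split once, normalize, skip empties,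
-- setdefault the bucket, append if the value is not already in it
def parse_structured_output_py_step (fields : PySem.Dict String (List String)) (line : String) :
    PySem.Dict String (List String) :=
  if PySem.Str.isIn ":" line then
    match PySem.Str.splitMax? line ":" 1 with
    | some (key :: value :: _) =>
      let normalized_key := PySem.Str.replace (PySem.Str.lower (PySem.Str.strip key)) " " "_"
      let normalized_value := PySem.Str.strip value
      if normalized_key = "" ∨ normalized_value = "" then fields
      else
        let bucket := fields.getD normalized_key []
        if normalized_value ∈ bucket then fields
        else fields.insert normalized_key (bucket ++ [normalized_value])
    | _ => fields
  else fields

def parse_structured_output_py (lines : List String) : List (String × List String) :=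
  (lines.foldl parse_structured_output_py_step PySem.Dict.empty).items

-- ===== PORT B =====
-- Source B's `parse` helper: line.partition(":") is ported exactly — the separator is found
-- iff ":" is in the line, and then head/tail are the two pieces of a first-occurrence split
def pv_parseLine (line : String) : Option (String × String) :=
  if PySem.Str.isIn ":" line then
    match PySem.Str.splitMax? line ":" 1 with
    | some (key :: value :: _) =>
      let k := PySem.Str.replace (PySem.Str.lower (PySem.Str.strip key)) " " "_"
      let v := PySem.Str.strip value
      if k ≠ "" ∧ v ≠ "" then some (k, v) else none
    | _ => none
  else none

-- pairs = [p for p in map(parse, lines) if p is not None]; then the grouped result: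
-- distinct keys in first-appearance order, each bucket = dedup of that key's values
def parse_structured_output_py_alt (lines : List String) : List (String × List String) :=
  let pairs := lines.filterMap pv_parseLine
  (PySem.List.dedup (pairs.map Prod.fst)).map
    (fun k => (k, PySem.List.dedup ((pairs.filter (fun p => p.1 == k)).map Prod.snd)))

-- ===== PRECONDITION & SPEC =====
def Spec_parse_structured_output_py (lines : List String) (out : List (String × List String)) : Prop := out = parse_structured_output_py_alt lines
instance (lines : List String) (out : List (String × List String)) : Decidable (Spec_parse_structured_output_py lines out) := by unfold Spec_parse_structured_output_py; infer_instance

-- ===== CLAIM =====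
def Claim_equal_parse_structured_output_py : Prop := ∀ (lines : List String), Dom_parse_structured_output_py lines → Spec_parse_structured_output_py lines (parse_structured_output_py lines)

-- ===== LEMMAS AND PROOFS =====

-- A's fold restated over the parsed pair list
def pv_pstep (d : PySem.Dict String (List String)) (p : String × String) :
    PySem.Dict String (List String) :=
  let bucket := d.getD p.1 []
  if p.2 ∈ bucket then d else d.insert p.1 (bucket ++ [p.2])

-- B's grouping of a pair list, decomposed
def pv_keys (xs : List (String × String)) : List String :=
  PySem.List.dedup (xs.map Prod.fst)
def pv_vals (xs : List (String × String)) (k : String) : List String :=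
  (xs.filter (fun p => p.1 == k)).map Prod.snd
def pv_f (xs : List (String × String)) : String → String × List String :=
  fun k => (k, PySem.List.dedup (pv_vals xs k))
def pv_G (xs : List (String × String)) : List (String × List String) :=
  (pv_keys xs).map (pv_f xs)

set_option maxHeartbeats 1000000 in
theorem pv_step_eq_parse (d : PySem.Dict String (List String)) (line : String) :
    parse_structured_output_py_step d line =
      match pv_parseLine line with
      | none => d
      | some p => pv_pstep d p := by
  unfold parse_structured_output_py_step pv_parseLine pv_pstep
  by_cases hin : PySem.Str.isIn ":" line = true
  · rw [if_pos hin, if_pos hin]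
    rcases hsp : PySem.Str.splitMax? line ":" 1 with _ | pieces
    · rfl
    rcases pieces with _ | ⟨key, rest⟩
    · rfl
    rcases rest with _ | ⟨value, rest'⟩
    · rfl
    simp only
    set nk := PySem.Str.replace (PySem.Str.lower (PySem.Str.strip key)) " " "_" with hnk
    set nv := PySem.Str.strip value with hnv
    by_cases hemp : nk = "" ∨ nv = ""
    · rw [if_pos hemp,
          if_neg (show ¬(nk ≠ "" ∧ nv ≠ "") from fun h => hemp.elim h.1 h.2)]
    · rw [if_neg hemp,
          if_pos (show nk ≠ "" ∧ nv ≠ "" from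
            ⟨fun h => hemp (Or.inl h), fun h => hemp (Or.inr h)⟩)]
  · rw [if_neg hin, if_neg hin]

theorem pv_fold_filterMap (lines : List String) (d : PySem.Dict String (List String)) :
    lines.foldl parse_structured_output_py_step d =
      (lines.filterMap pv_parseLine).foldl pv_pstep d := by
  induction lines generalizing d with
  | nil => rfl
  | cons line rest ih =>
    simp only [List.foldl_cons, List.filterMap_cons]
    rw [pv_step_eq_parse]
    cases pv_parseLine line with
    | none => exact ih d
    | some p => simp only [List.foldl_cons]; exact ih _

theorem pv_get?_mk_map (ks : List String) (g : String → List String) (k : String) :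
    (PySem.Dict.mk (ks.map (fun k' => (k', g k')))).get? k =
      if k ∈ ks then some (g k) else none := by
  induction ks with
  | nil => rfl
  | cons a rest ih =>
    simp only [List.map_cons]
    rw [PySem.Dict.get?_mk_cons]
    by_cases h : a = k
    · subst h; simp
    · rw [if_neg (by simpa using h), ih]
      by_cases hm : k ∈ rest <;> simp [hm, Ne.symm h]

theorem pv_dedup_append_singleton (b : List String) (v : String) :
    PySem.List.dedup (b ++ [v]) =
      if v ∈ b then PySem.List.dedup b else PySem.List.dedup b ++ [v] := by
  rw [PySem.List.dedup_eq_ofList, PySem.List.dedup_eq_ofList, PySem.Set.ofList_eq_foldl,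
      PySem.Set.ofList_eq_foldl, List.foldl_append]
  simp only [List.foldl]
  rw [show PySem.Set.add (List.foldl PySem.Set.add [] b) v =
      if PySem.Set.contains (List.foldl PySem.Set.add [] b) v = true then
        List.foldl PySem.Set.add [] b
      else List.foldl PySem.Set.add [] b ++ [v] from rfl]
  have hmem : PySem.Set.contains (List.foldl PySem.Set.add [] b) v = true ↔ v ∈ b := by
    rw [PySem.Set.contains_iff, ← PySem.Set.ofList_eq_foldl, PySem.Set.mem_ofList]
  by_cases h : v ∈ b
  · rw [if_pos (hmem.mpr h), if_pos h]
  · rw [if_neg (fun hc => h (hmem.mp hc)), if_neg h]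

theorem pv_keys_append (xs : List (String × String)) (k v : String) :
    pv_keys (xs ++ [(k, v)]) =
      if k ∈ xs.map Prod.fst then pv_keys xs else pv_keys xs ++ [k] := by
  unfold pv_keys
  rw [List.map_append]
  exact pv_dedup_append_singleton _ _

theorem pv_vals_append_self (xs : List (String × String)) (k v : String) :
    pv_vals (xs ++ [(k, v)]) k = pv_vals xs k ++ [v] := by
  unfold pv_vals
  rw [List.filter_append]
  simp

theorem pv_vals_append_ne (xs : List (String × String)) (k v k' : String) (h : k' ≠ k) :
    pv_vals (xs ++ [(k, v)]) k' = pv_vals xs k' := by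
  unfold pv_vals
  rw [List.filter_append]
  have hb : (((k, v) : String × String).1 == k') = false := by simpa using Ne.symm h
  simp [hb]

theorem pv_get?_G (xs : List (String × String)) (k : String) :
    (PySem.Dict.mk (pv_G xs)).get? k =
      if k ∈ pv_keys xs then some (PySem.List.dedup (pv_vals xs k)) else none :=
  pv_get?_mk_map (pv_keys xs) (fun k' => PySem.List.dedup (pv_vals xs k')) k

theorem pv_vals_nil_of_not_mem (xs : List (String × String)) (k : String)
    (h : k ∉ xs.map Prod.fst) : pv_vals xs k = [] := by
  unfold pv_vals
  rw [List.filter_eq_nil_iff.mpr (fun p hp hk => h (List.mem_map.mpr ⟨p, hp, by simpa using hk⟩))]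
  rfl

-- one step of the pair fold on the grouped image
theorem pv_pstep_G (xs : List (String × String)) (k v : String) :
    pv_pstep (PySem.Dict.mk (pv_G xs)) (k, v) = PySem.Dict.mk (pv_G (xs ++ [(k, v)])) := by
  unfold pv_pstep
  simp only
  by_cases hk : k ∈ xs.map Prod.fst
  · have hkk : k ∈ pv_keys xs := by rw [pv_keys, PySem.List.mem_dedup]; exact hk
    have hgd : (PySem.Dict.mk (pv_G xs)).getD k [] = PySem.List.dedup (pv_vals xs k) := by
      rw [PySem.Dict.getD_eq_get?_getD, pv_get?_G, if_pos hkk]; rfl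
    rw [hgd]
    have hG' : pv_G (xs ++ [(k, v)]) = (pv_keys xs).map (pv_f (xs ++ [(k, v)])) := by
      rw [pv_G, pv_keys_append, if_pos hk]
    by_cases hv : v ∈ pv_vals xs k
    · rw [if_pos ((PySem.List.mem_dedup _ _).mpr hv)]
      apply PySem.Dict.ext
      show pv_G xs = pv_G (xs ++ [(k, v)])
      rw [hG', pv_G]
      apply List.map_congr_left
      intro k' _
      by_cases he : k' = k
      · subst he
        simp only [pv_f]
        rw [pv_vals_append_self, pv_dedup_append_singleton, if_pos hv]
      · simp only [pv_f]
        rw [pv_vals_append_ne _ _ _ _ he]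
    · rw [if_neg (fun hc => hv ((PySem.List.mem_dedup _ _).mp hc))]
      have hcont : (PySem.Dict.mk (pv_G xs)).contains k = true := by
        rw [PySem.Dict.contains_eq_isSome_get?, pv_get?_G, if_pos hkk]; rfl
      apply PySem.Dict.ext
      rw [PySem.Dict.items_insert, if_pos hcont]
      show (pv_G xs).map _ = pv_G (xs ++ [(k, v)])
      rw [hG']
      simp only [pv_G]
      rw [List.map_map]
      apply List.map_congr_left
      intro k' _
      by_cases he : k' = k
      · subst he
        simp only [Function.comp_apply, pv_f]
        rw [if_pos (by simp), pv_vals_append_self, pv_dedup_append_singleton, if_neg hv]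
      · simp only [Function.comp_apply, pv_f]
        rw [if_neg (by simpa using he), pv_vals_append_ne _ _ _ _ he]
  · have hkk : k ∉ pv_keys xs := by rw [pv_keys, PySem.List.mem_dedup]; exact hk
    have hgd : (PySem.Dict.mk (pv_G xs)).getD k [] = [] := by
      rw [PySem.Dict.getD_eq_get?_getD, pv_get?_G, if_neg hkk]; rfl
    rw [hgd, if_neg (by simp)]
    have hcont : (PySem.Dict.mk (pv_G xs)).contains k = false := by
      rw [PySem.Dict.contains_eq_isSome_get?, pv_get?_G, if_neg hkk]; rfl
    apply PySem.Dict.ext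
    rw [PySem.Dict.items_insert, if_neg (by simp [hcont])]
    show pv_G xs ++ [(k, [] ++ [v])] = pv_G (xs ++ [(k, v)])
    simp only [pv_G]
    rw [pv_keys_append, if_neg hk, List.map_append, List.map_cons, List.map_nil]
    congr 1
    · apply List.map_congr_left
      intro k' hk'
      have hne : k' ≠ k := fun h => hkk (h ▸ hk')
      simp only [pv_f]
      rw [pv_vals_append_ne _ _ _ _ hne]
    · simp only [pv_f]
      rw [pv_vals_append_self, pv_vals_nil_of_not_mem _ _ hk, List.nil_append]
      have hdv : PySem.List.dedup [v] = [v] := by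
        rw [PySem.List.dedup_eq_ofList]; rfl
      rw [hdv]

-- the heart: A's per-pair fold from the empty dict builds exactly B's grouping
theorem pv_fold_pairs (pairs : List (String × String)) :
    pairs.foldl pv_pstep PySem.Dict.empty = PySem.Dict.mk (pv_G pairs) := by
  induction pairs using List.reverseRecOn with
  | nil => rfl
  | append_singleton xs p ih =>
    obtain ⟨k, v⟩ := p
    rw [List.foldl_append, ih]
    simp only [List.foldl]
    exact pv_pstep_G xs k v

-- ===== VERDICT =====
theorem parse_structured_output_py_spec : Claim_equal_parse_structured_output_py := by
  intro lines _
  show parse_structured_output_py lines = parse_structured_output_py_alt lines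
  unfold parse_structured_output_py parse_structured_output_py_alt
  rw [pv_fold_filterMap, pv_fold_pairs]
  rfl
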